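-- pv_equiv track=rewrite | github.com/grobertson/kryten-py | src/kryten/subject_builder.py | sanitize_token
-- ===== SOURCE A (Python) =====
-- MAX_TOKEN_LENGTH = 100
--
-- def sanitize_token(token: str) -> str:
--     """Sanitize subject token for NATS compatibility.
--
--     Converts to lowercase, replaces spaces with hyphens, and removes invalid
--     characters including NATS wildcards (* and >).
--
--     Args:
--         token: Raw token string to sanitize.
--
--     Returns:
--         Sanitized token suitable for NATS subject.
--
--     Examples:
--         >>> sanitize_token("My Channel!")
--         'my-channel'
--         >>> sanitize_token("Test_Channel #1")
--         'test_channel-1'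
--         >>> sanitize_token("café")
--         'café'
--     """
--     if not token:
--         return ""
--
--     # Convert to lowercase
--     token = token.lower()
--
--     # Replace spaces with hyphens
--     token = token.replace(" ", "-")
--
--     # Remove NATS wildcard characters
--     token = token.replace("*", "").replace(">", "")
--
--     # Remove invalid characters for NATS subjects
--     # Keep: alphanumeric (ASCII + Unicode), dots, hyphens, underscores
--     # Remove: other special chars, but preserve UTF-8 letters
--     # Simple approach: remove only problematic ASCII special chars
--     invalid_chars = "!@#$%^&*()+=[]{|}\\:;\"'<>,?/"
--     for char in invalid_chars:
--         token = token.replace(char, "")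
--
--     # Truncate to prevent exceeding NATS subject length limit
--     if len(token) > MAX_TOKEN_LENGTH:
--         token = token[:MAX_TOKEN_LENGTH]
--
--     return token
-- ===== SOURCE B (Python) =====
-- MAX_TOKEN_LENGTH = 100
--
-- _REMOVED = set("!@#$%^&*()+=[]{|}\\:;\"'<>,?/" + "*>")
--
--
-- def sanitize_token(token: str) -> str:
--     out = []
--     for ch in token.lower():
--         if ch == " ":
--             out.append("-")
--         elif ch not in _REMOVED:
--             out.append(ch)
--     return "".join(out)[:MAX_TOKEN_LENGTH]
-- ===== Notes on version B (the rewrite author's own statement) =====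
-- stated objective: simpler
-- what changed: A rewrites the whole string ~30 times (one .replace scan per invalid character); B lowercases once and makes a single character-level pass that maps space to hyphen, skips characters in a precomputed removal set, keeps the rest, then truncates.
import Mathlib
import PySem

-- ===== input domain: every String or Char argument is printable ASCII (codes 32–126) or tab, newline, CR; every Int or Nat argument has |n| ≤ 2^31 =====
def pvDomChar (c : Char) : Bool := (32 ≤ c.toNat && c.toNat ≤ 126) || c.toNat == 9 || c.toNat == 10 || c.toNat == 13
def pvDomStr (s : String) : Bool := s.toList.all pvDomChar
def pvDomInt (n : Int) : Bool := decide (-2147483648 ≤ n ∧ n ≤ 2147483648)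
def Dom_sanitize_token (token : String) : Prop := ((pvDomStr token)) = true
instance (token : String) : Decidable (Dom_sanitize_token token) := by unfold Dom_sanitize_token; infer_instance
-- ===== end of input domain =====

-- B replaces A's chain of ~30 sequential .replace passes by one lowercase pass that maps ' ' to '-',
-- skips characters in a removal set, keeps the rest, then truncates; objective: simpler single-pass decomposition.


-- ===== PORT A =====
def sanitize_token (token : String) : String :=
  if token = "" then ""
  else
    let t := PySem.Str.lower token
    let t := PySem.Str.replace t " " "-"
    let t := PySem.Str.replace (PySem.Str.replace t "*" "") ">" ""
    let t := "!@#$%^&*()+=[]{|}\\:;\"'<>,?/".toList.foldl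
      (fun t ch => PySem.Str.replace t (String.ofList [ch]) "") t
    if PySem.Str.len t > 100 then PySem.Str.slice t none (some 100) else t

-- ===== PORT B =====
-- module-level set _REMOVED = set(invalid_chars + "*>")
def pvRemoved : PySem.Set Char :=
  PySem.Set.ofList ("!@#$%^&*()+=[]{|}\\:;\"'<>,?/" ++ "*>").toList

-- out is a list of single characters; ''.join(out) is String.ofList out, then [:100]
def sanitize_token_alt (token : String) : String :=
  let out := (PySem.Str.lower token).toList.foldl
    (fun acc ch =>
      if ch = ' ' then acc ++ ['-']
      else if PySem.Set.contains pvRemoved ch then acc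
      else acc ++ [ch]) []
  PySem.Str.slice (String.ofList out) none (some 100)

-- ===== PRECONDITION & SPEC =====
def Spec_sanitize_token (token : String) (out : String) : Prop := out = sanitize_token_alt token
instance (token : String) (out : String) : Decidable (Spec_sanitize_token token out) := by unfold Spec_sanitize_token; infer_instance

-- ===== CLAIM (what is proved, stated in full; the proofs are below) =====
def Claim_equal_sanitize_token : Prop := ∀ (token : String), Dom_sanitize_token token → Spec_sanitize_token token (sanitize_token token)

-- ===== LEMMAS AND PROOFS =====

-- the literal list of A's invalid_chars
def pvInv : List Char := "!@#$%^&*()+=[]{|}\\:;\"'<>,?/".toList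

-- the per-character action of B's single pass
def pvF (c : Char) : List Char :=
  if c = ' ' then ['-'] else if PySem.Set.contains pvRemoved c then [] else [c]

lemma go_single (a : Char) (r : List Char) :
    ∀ (l : List Char) (fuel : Nat) (acc : List Char), l.length ≤ fuel →
      PySem.Chars.replace.go [a] r fuel l acc
        = acc.reverse ++ l.flatMap (fun c => if c = a then r else [c]) := by
  intro l
  induction l with
  | nil => intro fuel acc _; cases fuel <;> simp [PySem.Chars.replace.go]
  | cons c t ih =>
    intro fuel acc hfuel
    cases fuel with
    | zero => simp at hfuel
    | succ n =>
      simp only [PySem.Chars.replace.go, List.isPrefixOf]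
      by_cases hc : c = a
      · subst hc
        rw [if_pos (by simp)]
        rw [show List.drop [c].length (c :: t) = t by simp]
        rw [ih n (r.reverse ++ acc) (by simp at hfuel; omega)]
        simp
      · rw [if_neg (by simp; intro h; exact hc h.symm)]
        rw [ih n (c :: acc) (by simp at hfuel; omega)]
        simp [hc]

lemma replace_single (s : List Char) (a : Char) (r : List Char) :
    PySem.Chars.replace s [a] r = s.flatMap (fun c => if c = a then r else [c]) := by
  rw [PySem.Chars.replace]
  simp only [List.isEmpty_cons, Bool.false_eq_true, if_false]
  rw [go_single a r s s.length [] (le_refl _)]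
  simp

lemma flatMap_del (s : List Char) (a : Char) :
    s.flatMap (fun c => if c = a then ([] : List Char) else [c])
      = s.filter (fun c => c != a) := by
  induction s with
  | nil => simp
  | cons c t ih => by_cases h : c = a <;> simp [h, ih]

lemma flatMap_subst (s : List Char) (a b : Char) :
    s.flatMap (fun c => if c = a then [b] else [c])
      = s.map (fun c => if c = a then b else c) := by
  induction s with
  | nil => simp
  | cons c t ih => by_cases h : c = a <;> simp [h, ih]

lemma hrepl (s : String) (a : Char) :
    (PySem.Str.replace s (String.ofList [a]) "").toList
      = s.toList.filter (fun c => c != a) := by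
  rw [PySem.Str.toList_replace]
  rw [show (String.ofList [a]).toList = [a] by simp]
  rw [show ("" : String).toList = [] by simp]
  rw [replace_single, flatMap_del]

lemma foldl_remove_toList (chs : List Char) :
    ∀ (t : String),
      (chs.foldl (fun t ch => PySem.Str.replace t (String.ofList [ch]) "") t).toList
        = t.toList.filter (fun c => !chs.contains c) := by
  induction chs with
  | nil => intro t; simp
  | cons a chs ih =>
    intro t
    simp only [List.foldl_cons]
    rw [ih, hrepl, List.filter_filter]
    apply List.filter_congr
    intro c _
    by_cases hca : c = a <;> by_cases hcs : c ∈ chs <;> simp [hca, hcs]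

lemma foldl_B (s : List Char) :
    ∀ (acc : List Char),
      s.foldl (fun acc ch =>
        if ch = ' ' then acc ++ ['-']
        else if PySem.Set.contains pvRemoved ch then acc
        else acc ++ [ch]) acc = acc ++ s.flatMap pvF := by
  induction s with
  | nil => intro acc; simp
  | cons c t ih =>
    intro acc
    simp only [List.foldl_cons]
    by_cases h : c = ' '
    · rw [if_pos h, ih]
      simp [pvF, h]
    · rw [if_neg h]
      by_cases h2 : PySem.Set.contains pvRemoved c = true
      · rw [if_pos h2, ih]
        have hm : c ∈ pvRemoved := by simpa using h2
        simp [pvF, h, hm]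
      · rw [if_neg h2, ih]
        have hm : c ∉ pvRemoved := by simpa using h2
        simp [pvF, h, hm]

lemma filter_map_eq_flatMap (s : List Char) (f : Char → Char) (p : Char → Bool) :
    (s.map f).filter p = s.flatMap (fun c => if p (f c) then [f c] else []) := by
  induction s with
  | nil => simp
  | cons c t ih => by_cases h : p (f c) <;> simp [h, ih]

lemma removed_eq_inv : pvRemoved = pvInv := by decide

-- pointwise: A's map-then-filter action equals B's per-character action
lemma pointwise (c : Char) :
    (if ((!pvInv.contains (if c = ' ' then '-' else c)
          && ((if c = ' ' then '-' else c) != '>'))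
          && ((if c = ' ' then '-' else c) != '*'))
        then [if c = ' ' then '-' else c] else [])
      = pvF c := by
  by_cases hsp : c = ' '
  · subst hsp; decide
  · simp only [pvF, if_neg hsp, removed_eq_inv]
    by_cases h1 : c = '*'
    · subst h1; decide
    · by_cases h2 : c = '>'
      · subst h2; decide
      · have hb1 : (c != '*') = true := by simp [h1]
        have hb2 : (c != '>') = true := by simp [h2]
        rw [hb1, hb2]
        by_cases hm : c ∈ pvInv <;> simp [hm]

lemma core (L : List Char) :
    ((L.map (fun c => if c = ' ' then '-' else c)).filter
        (fun c => (!pvInv.contains c && (c != '>')) && (c != '*')))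
      = L.flatMap pvF := by
  rw [filter_map_eq_flatMap]
  exact List.flatMap_congr (fun c _ => pointwise c)

lemma toList_B (token : String) :
    (sanitize_token_alt token).toList
      = ((PySem.Str.lower token).toList.flatMap pvF).take 100 := by
  unfold sanitize_token_alt
  simp only [foldl_B, List.nil_append]
  rw [PySem.Str.toList_slice]
  rw [show (String.ofList ((PySem.Str.lower token).toList.flatMap pvF)).toList
        = (PySem.Str.lower token).toList.flatMap pvF by simp]
  rw [PySem.Chars.slice_eq_listSlice]
  simp [pysem]

lemma toList_A_chain (token : String) :
    ("!@#$%^&*()+=[]{|}\\:;\"'<>,?/".toList.foldl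
       (fun t ch => PySem.Str.replace t (String.ofList [ch]) "")
       (PySem.Str.replace
         (PySem.Str.replace (PySem.Str.replace (PySem.Str.lower token) " " "-") "*" "")
         ">" "")).toList
      = (PySem.Str.lower token).toList.flatMap pvF := by
  rw [foldl_remove_toList]
  rw [show (">" : String) = String.ofList ['>'] by decide, hrepl]
  rw [show ("*" : String) = String.ofList ['*'] by decide, hrepl]
  have hsub : (PySem.Str.replace (PySem.Str.lower token) " " "-").toList
      = (PySem.Str.lower token).toList.map (fun c => if c = ' ' then '-' else c) := by
    rw [PySem.Str.toList_replace]
    rw [show (" " : String).toList = [' '] by simp]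
    rw [show ("-" : String).toList = ['-'] by simp]
    rw [replace_single, flatMap_subst]
  rw [hsub, List.filter_filter, List.filter_filter]
  exact core _

theorem sanitize_token_eq (token : String) :
    sanitize_token token = sanitize_token_alt token := by
  apply String.toList_inj.mp
  rw [toList_B]
  unfold sanitize_token
  by_cases h0 : token = ""
  · subst h0
    rw [if_pos rfl]
    decide
  · rw [if_neg h0]
    simp only []
    set t := "!@#$%^&*()+=[]{|}\\:;\"'<>,?/".toList.foldl
      (fun t ch => PySem.Str.replace t (String.ofList [ch]) "")
      (PySem.Str.replace
        (PySem.Str.replace (PySem.Str.replace (PySem.Str.lower token) " " "-") "*" "")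
        ">" "") with ht
    have hT : t.toList = (PySem.Str.lower token).toList.flatMap pvF := toList_A_chain token
    by_cases hlen : PySem.Str.len t > 100
    · rw [if_pos hlen]
      rw [PySem.Str.toList_slice, PySem.Chars.slice_eq_listSlice]
      rw [hT]; simp [pysem]
    · rw [if_neg hlen]
      rw [← hT]
      have hl : t.toList.length ≤ 100 := by
        have := PySem.Str.len_eq t
        omega
      rw [List.take_of_length_le hl]

-- ===== VERDICT (by name: the statement is the Claim_ definition above) =====
theorem sanitize_token_spec : Claim_equal_sanitize_token := by
  intro token _
  unfold Spec_sanitize_token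
  exact sanitize_token_eq token
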